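-- pv_equiv track=rewrite | github.com/collinsakenga/codewars_solutions | 6 kyu/FIRE and FURY.py | fire_and_fury
-- ===== SOURCE A (Python) =====
-- def fire_and_fury(tweet):
--     for i in tweet:
--         if i not in "EFIRUY":
--             return 'Fake tweet.'
--     res=[]
--     count=0
--     count2=0
--     for i in range(len(tweet)-3):
--         if tweet[i:i+4]=="FIRE":
--             if count2:
--                 res.append(" ".join(["I", "am"]+["really"]*(count2-1)+["furious."]))
--                 count2=0
--             count+=1
--         elif tweet[i:i+4]=="FURY":
--             if count:
--                 res.append(" ".join(["You"]+["and" ,"you"]*(count-1)+["are" ,"fired!"]))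
--                 count=0
--             count2+=1
--     if count2:
--         res.append(" ".join(["I", "am"]+["really"]*(count2-1)+["furious."]))
--     if count:
--         res.append(" ".join(["You"]+["and" ,"you"]*(count-1)+["are" ,"fired!"]))
--     return 'Fake tweet.' if not res else " ".join(res)
-- ===== SOURCE B (Python) =====
-- from itertools import groupby
--
-- def fire_and_fury(tweet):
--     if any(c not in "EFIRUY" for c in tweet):
--         return 'Fake tweet.'
--     windows = [tweet[i:i+4] for i in range(len(tweet) - 3)]
--     tokens = [w for w in windows if w in ("FIRE", "FURY")]
--     parts = []
--     for word, grp in groupby(tokens):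
--         n = len(list(grp))
--         if word == "FIRE":
--             parts.append("You " + "and you " * (n - 1) + "are fired!")
--         else:
--             parts.append("I am " + "really " * (n - 1) + "furious.")
--     return " ".join(parts) if parts else 'Fake tweet.'
-- ===== Notes on version B (the rewrite author's own statement) =====
-- stated objective: idiomatic
-- what changed: Replaces A's stateful two-counter loop with flush-on-switch by a two-phase pipeline: filter the 4-char windows to a token list, group consecutive runs with itertools.groupby, and render each run with string repetition instead of list-building plus join.
import Mathlib
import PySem

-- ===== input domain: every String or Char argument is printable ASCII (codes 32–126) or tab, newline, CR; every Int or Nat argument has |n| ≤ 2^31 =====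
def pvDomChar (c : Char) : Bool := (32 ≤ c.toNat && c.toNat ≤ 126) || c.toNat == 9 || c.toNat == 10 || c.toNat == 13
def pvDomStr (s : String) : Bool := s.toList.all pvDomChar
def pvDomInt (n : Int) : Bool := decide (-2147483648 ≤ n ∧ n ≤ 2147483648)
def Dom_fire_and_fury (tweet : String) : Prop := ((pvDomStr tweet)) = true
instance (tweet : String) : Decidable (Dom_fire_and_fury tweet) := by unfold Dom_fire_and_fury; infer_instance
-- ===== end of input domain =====

-- B replaces A's stateful two-counter loop by a filter → group-consecutive-runs → render pipeline (same O(n) cost; objective: idiomatic decomposition).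


-- ===== PORT A =====
-- " ".join(["You"]+["and","you"]*(count-1)+["are","fired!"])
def pvFiredA (count : Nat) : String :=
  PySem.Str.join " " (["You"] ++ (List.replicate (count - 1) ["and", "you"]).flatten ++ ["are", "fired!"])
-- " ".join(["I","am"]+["really"]*(count2-1)+["furious."])
def pvFuriousA (count2 : Nat) : String :=
  PySem.Str.join " " (["I", "am"] ++ List.replicate (count2 - 1) "really" ++ ["furious."])

-- one iteration of A's for-loop, as a function of the window w = tweet[i:i+4]
def pvStepA (st : List String × Nat × Nat) (w : List Char) : List String × Nat × Nat :=
  if w = "FIRE".toList then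
    let p := if st.2.2 ≠ 0 then (st.1 ++ [pvFuriousA st.2.2], 0) else (st.1, st.2.2)
    (p.1, st.2.1 + 1, p.2)
  else if w = "FURY".toList then
    let p := if st.2.1 ≠ 0 then (st.1 ++ [pvFiredA st.2.1], 0) else (st.1, st.2.1)
    (p.1, p.2, st.2.2 + 1)
  else st

def fire_and_fury (tweet : String) : String :=
  -- for i in tweet: if i not in "EFIRUY": return 'Fake tweet.'
  if tweet.toList.any (fun c => !("EFIRUY".toList.contains c)) then "Fake tweet."
  else
    let cs := tweet.toList
    -- range(len(tweet)-3): empty when len < 3, exactly as Nat subtraction truncates;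
    -- tweet[i:i+4] with 0 ≤ i and i+4 ≤ len is exactly (cs.drop i).take 4
    let r := (List.range (cs.length - 3)).foldl (fun st i => pvStepA st ((cs.drop i).take 4)) ([], 0, 0)
    let res := if r.2.2 ≠ 0 then r.1 ++ [pvFuriousA r.2.2] else r.1
    let res := if r.2.1 ≠ 0 then res ++ [pvFiredA r.2.1] else res
    if res = [] then "Fake tweet." else PySem.Str.join " " res

-- ===== PORT B =====
-- Python s * n
def pvRep (s : String) (n : Nat) : String := PySem.Str.join "" (List.replicate n s)
def pvFiredB (n : Nat) : String := "You " ++ pvRep "and you " (n - 1) ++ "are fired!"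
def pvFuriousB (n : Nat) : String := "I am " ++ pvRep "really " (n - 1) ++ "furious."

-- itertools.groupby on the token list: consecutive runs with their lengths
def pvGo (x : List Char) (n : Nat) : List (List Char) → List (List Char × Nat)
  | [] => [(x, n)]
  | y :: ys => if y = x then pvGo x (n + 1) ys else (x, n) :: pvGo y 1 ys

def pvGroupRuns : List (List Char) → List (List Char × Nat)
  | [] => []
  | x :: xs => pvGo x 1 xs

def pvRender (g : List Char × Nat) : String :=
  if g.1 = "FIRE".toList then pvFiredB g.2 else pvFuriousB g.2

def fire_and_fury_alt (tweet : String) : String :=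
  if tweet.toList.any (fun c => !("EFIRUY".toList.contains c)) then "Fake tweet."
  else
    let cs := tweet.toList
    let windows := (List.range (cs.length - 3)).map (fun i => (cs.drop i).take 4)
    let tokens := windows.filter (fun w => w = "FIRE".toList ∨ w = "FURY".toList)
    let parts := (pvGroupRuns tokens).map pvRender
    if parts = [] then "Fake tweet." else PySem.Str.join " " parts

-- ===== PRECONDITION & SPEC =====
def Spec_fire_and_fury (tweet : String) (out : String) : Prop := out = fire_and_fury_alt tweet
instance (tweet : String) (out : String) : Decidable (Spec_fire_and_fury tweet out) := by unfold Spec_fire_and_fury; infer_instance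

-- ===== CLAIM (what is proved, stated in full; the proofs are below) =====
def Claim_equal_fire_and_fury : Prop := ∀ (tweet : String), Dom_fire_and_fury tweet → Spec_fire_and_fury tweet (fire_and_fury tweet)

-- ===== LEMMAS AND PROOFS =====

-- concatenation of a list of pieces, one step (used for Python's s * n = join "" (replicate n s))
lemma join_nil_cons (a : List Char) (l : List (List Char)) :
    PySem.Chars.join [] (a :: l) = a ++ PySem.Chars.join [] l := by
  cases l with
  | nil => simp [PySem.Chars.join_singleton, PySem.Chars.join_nil]
  | cons b l => simpa using PySem.Chars.join_cons_cons [] a b l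

-- join " " over the tail "and you and you … are fired!", with a generic head x
lemma fired_aux (m : Nat) (x : List Char) :
    PySem.Chars.join " ".toList (x :: List.map String.toList ((List.replicate m ["and", "you"]).flatten ++ ["are", "fired!"]))
    = x ++ " ".toList ++ PySem.Chars.join "".toList (List.map String.toList (List.replicate m "and you ")) ++ "are fired!".toList := by
  induction m generalizing x with
  | zero =>
    simp [PySem.Chars.join_cons_cons, PySem.Chars.join_singleton, PySem.Chars.join_nil]
  | succ k ih =>
    simp only [List.replicate_succ, List.flatten_cons, List.cons_append, List.map_cons,
      List.append_assoc, List.nil_append, PySem.Chars.join_cons_cons]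
    rw [ih "you".toList]
    simp [join_nil_cons]

-- join " " over the tail "really really … furious.", with a generic head x
lemma furious_aux (m : Nat) (x : List Char) :
    PySem.Chars.join " ".toList (x :: List.map String.toList (List.replicate m "really" ++ ["furious."]))
    = x ++ " ".toList ++ PySem.Chars.join "".toList (List.map String.toList (List.replicate m "really ")) ++ "furious.".toList := by
  induction m generalizing x with
  | zero =>
    simp [PySem.Chars.join_cons_cons, PySem.Chars.join_singleton, PySem.Chars.join_nil]
  | succ k ih =>
    simp only [List.replicate_succ, List.map_cons, List.cons_append, PySem.Chars.join_cons_cons]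
    rw [ih "really".toList]
    simp [join_nil_cons]

-- phrase equalities (the run counts produced by either loop are always ≥ 1)
lemma phrase_fired (n : Nat) : pvFiredA (n + 1) = pvFiredB (n + 1) := by
  apply String.toList_inj.mp
  simp only [pvFiredA, pvFiredB, pvRep, Nat.add_sub_cancel, PySem.Str.toList_join,
    String.toList_append, List.map_append, List.map_cons, List.map_nil, List.cons_append,
    List.nil_append, List.append_assoc]
  have := fired_aux n "You".toList
  simp only [List.map_append, List.map_cons, List.map_nil] at this ⊢
  rw [this]
  simp

lemma phrase_furious (n : Nat) : pvFuriousA (n + 1) = pvFuriousB (n + 1) := by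
  apply String.toList_inj.mp
  simp only [pvFuriousA, pvFuriousB, pvRep, Nat.add_sub_cancel, PySem.Str.toList_join,
    String.toList_append, List.map_append, List.map_cons, List.map_nil, List.cons_append,
    List.nil_append, List.append_assoc, PySem.Chars.join_cons_cons]
  have := furious_aux n "am".toList
  simp only [List.map_append, List.map_cons, List.map_nil] at this ⊢
  rw [this]
  simp

def pvFlush (st : List String × Nat × Nat) : List String :=
  let res := if st.2.2 ≠ 0 then st.1 ++ [pvFuriousA st.2.2] else st.1
  if st.2.1 ≠ 0 then res ++ [pvFiredA st.2.1] else res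

lemma render_fire (n : Nat) : pvFiredA (n + 1) = pvRender ("FIRE".toList, n + 1) := by
  simp [pvRender, phrase_fired n]

lemma render_fury (n : Nat) : pvFuriousA (n + 1) = pvRender ("FURY".toList, n + 1) := by
  have h : ¬ ("FURY".toList = "FIRE".toList) := by simp
  simp only [pvRender, if_neg h]
  exact phrase_furious n

-- windows that are neither FIRE nor FURY leave A's loop state unchanged
lemma step_skip (ts : List (List Char)) (st : List String × Nat × Nat) :
    ts.foldl pvStepA st = (ts.filter (fun w => w = "FIRE".toList ∨ w = "FURY".toList)).foldl pvStepA st := by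
  induction ts generalizing st with
  | nil => rfl
  | cons t ts ih =>
    by_cases htok : t = "FIRE".toList ∨ t = "FURY".toList
    · rw [List.foldl_cons, List.filter_cons, if_pos (by simpa using htok), List.foldl_cons]
      exact ih _
    · have h1 : ¬ t = "FIRE".toList := fun hh => htok (Or.inl hh)
      have h2 : ¬ t = "FURY".toList := fun hh => htok (Or.inr hh)
      have hs : pvStepA st t = st := by unfold pvStepA; rw [if_neg h1, if_neg h2]
      rw [List.foldl_cons, List.filter_cons, if_neg (by simpa using htok), hs]
      exact ih st

-- loop invariant: a pending run of n+1 FIREs (resp. FURYs) over a pure token list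
lemma key (ts : List (List Char)) (h : ∀ w ∈ ts, w = "FIRE".toList ∨ w = "FURY".toList) :
    ∀ (res : List String) (n : Nat),
      pvFlush (ts.foldl pvStepA (res, n + 1, 0)) = res ++ (pvGo "FIRE".toList (n + 1) ts).map pvRender
      ∧ pvFlush (ts.foldl pvStepA (res, 0, n + 1)) = res ++ (pvGo "FURY".toList (n + 1) ts).map pvRender := by
  induction ts with
  | nil =>
    intro res n
    constructor
    · simp [pvFlush, pvGo, render_fire n]
    · simp [pvFlush, pvGo, render_fury n]
  | cons t ts ih =>
    intro res n
    have ht := h t (List.mem_cons_self ..)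
    have hts : ∀ w ∈ ts, w = "FIRE".toList ∨ w = "FURY".toList :=
      fun w hw => h w (List.mem_cons_of_mem _ hw)
    rcases ht with ht | ht <;> subst ht
    · constructor
      · have hstep : pvStepA (res, n + 1, 0) "FIRE".toList = (res, n + 2, 0) := by
          simp [pvStepA]
        rw [List.foldl_cons, hstep]
        have := (ih hts res (n + 1)).1
        rw [this]
        simp [pvGo]
      · have hstep : pvStepA (res, 0, n + 1) "FIRE".toList = (res ++ [pvFuriousA (n + 1)], 1, 0) := by
          simp [pvStepA]
        rw [List.foldl_cons, hstep, render_fury n]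
        have := (ih hts (res ++ [pvRender ("FURY".toList, n + 1)]) 0).1
        rw [this]
        simp [pvGo]
    · constructor
      · have hstep : pvStepA (res, n + 1, 0) "FURY".toList = (res ++ [pvFiredA (n + 1)], 0, 1) := by
          simp [pvStepA]
        rw [List.foldl_cons, hstep, render_fire n]
        have := (ih hts (res ++ [pvRender ("FIRE".toList, n + 1)]) 0).2
        rw [this]
        simp [pvGo]
      · have hstep : pvStepA (res, 0, n + 1) "FURY".toList = (res, 0, n + 2) := by
          simp [pvStepA]
        rw [List.foldl_cons, hstep]
        have := (ih hts res (n + 1)).2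
        rw [this]
        simp [pvGo]

lemma top (ts : List (List Char)) (h : ∀ w ∈ ts, w = "FIRE".toList ∨ w = "FURY".toList) :
    pvFlush (ts.foldl pvStepA ([], 0, 0)) = (pvGroupRuns ts).map pvRender := by
  cases ts with
  | nil => simp [pvFlush, pvGroupRuns]
  | cons t ts =>
    have hts : ∀ w ∈ ts, w = "FIRE".toList ∨ w = "FURY".toList :=
      fun w hw => h w (List.mem_cons_of_mem _ hw)
    rcases h t (List.mem_cons_self ..) with ht | ht <;> subst ht
    · have hstep : pvStepA (([] : List String), 0, 0) "FIRE".toList = ([], 1, 0) := by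
        simp [pvStepA]
      rw [List.foldl_cons, hstep, pvGroupRuns]
      exact (key ts hts [] 0).1
    · have hstep : pvStepA (([] : List String), 0, 0) "FURY".toList = ([], 0, 1) := by
        simp [pvStepA]
      rw [List.foldl_cons, hstep, pvGroupRuns]
      exact (key ts hts [] 0).2

-- the res list A accumulates equals the parts list B renders
lemma core (cs : List Char) :
    pvFlush ((List.range (cs.length - 3)).foldl (fun st i => pvStepA st ((cs.drop i).take 4)) ([], 0, 0))
    = (pvGroupRuns (((List.range (cs.length - 3)).map (fun i => (cs.drop i).take 4)).filter
        (fun w => w = "FIRE".toList ∨ w = "FURY".toList))).map pvRender := by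
  rw [← List.foldl_map]
  rw [step_skip]
  apply top
  intro w hw
  have := List.of_mem_filter hw
  simpa using this

-- ===== VERDICT (by name: the statement is the Claim_ definition above) =====
theorem fire_and_fury_spec : Claim_equal_fire_and_fury := by
  intro tweet _
  unfold Spec_fire_and_fury fire_and_fury fire_and_fury_alt
  by_cases hbad : (tweet.toList.any (fun c => !("EFIRUY".toList.contains c))) = true
  · rw [if_pos hbad, if_pos hbad]
  · rw [if_neg hbad, if_neg hbad]
    have hc := core tweet.toList
    simp only [pvFlush] at hc
    simp only [hc]
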